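-- pv_equiv track=rewrite | github.com/ahowa022/AssaadHowayek | Python Projects/University Assignments/Assignment2/a2_part2_300057716.py | alienNumbersAgain
-- ===== SOURCE A (Python) =====
-- def alienNumbersAgain(s):
--     '''(str)---> (int)
--     Returns a sum of the character since each character represents a value.
--     It is called an alien message. (T)=1024, (y)=598 (!)=121 (a)=42 (N)=6 (U)=1
--     Precondition: s only consist of characters in "Ty!aNU" '''
--     accumulator = 0
--     for char in s:
--         if char == "T":
--             accumulator+=1024
--         elif char == "y":
--             accumulator+=598
--         elif char == "!":
--             accumulator+= 121
--         elif char == "a":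
--             accumulator+= 42
--         elif char == "N":
--             accumulator+=6
--         elif char == "U":
--             accumulator+=1
--     return accumulator
-- ===== SOURCE B (Python) =====
-- from collections import Counter
--
-- _WEIGHTS = {'T': 1024, 'y': 598, '!': 121, 'a': 42, 'N': 6, 'U': 1}
--
-- def alienNumbersAgain(s):
--     counts = Counter(s)
--     return sum(counts.get(c, 0) * w for c, w in _WEIGHTS.items())
-- ===== Notes on version B (the rewrite author's own statement) =====
-- stated objective: alternative
-- what changed: Replaces the per-character if/elif accumulation with a Counter frequency table built in one pass followed by a weighted sum over the six fixed characters; counting runs in C, removing per-character Python branching.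
import Mathlib
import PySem

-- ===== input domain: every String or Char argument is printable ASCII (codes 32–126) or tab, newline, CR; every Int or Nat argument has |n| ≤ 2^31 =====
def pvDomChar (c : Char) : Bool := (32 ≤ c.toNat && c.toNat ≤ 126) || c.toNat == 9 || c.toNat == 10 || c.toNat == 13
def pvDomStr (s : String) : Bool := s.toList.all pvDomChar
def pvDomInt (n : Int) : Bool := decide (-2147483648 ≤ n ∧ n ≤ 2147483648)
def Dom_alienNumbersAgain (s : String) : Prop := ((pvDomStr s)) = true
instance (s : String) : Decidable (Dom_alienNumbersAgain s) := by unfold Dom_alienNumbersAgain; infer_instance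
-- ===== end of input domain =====

-- B replaces A's per-character if/elif accumulation with a Counter table then a weighted sum over the six fixed characters (alternative decomposition).

-- ===== PORT A =====
-- literal transliteration of A's if/elif loop
def alienNumbersAgain (s : String) : Int :=
  s.toList.foldl
    (fun accumulator char =>
      if char = 'T' then accumulator + 1024
      else if char = 'y' then accumulator + 598
      else if char = '!' then accumulator + 121
      else if char = 'a' then accumulator + 42
      else if char = 'N' then accumulator + 6
      else if char = 'U' then accumulator + 1
      else accumulator)
    0

-- ===== PORT B =====
def alienWeights : List (Char × Int) :=
  [('T', 1024), ('y', 598), ('!', 121), ('a', 42), ('N', 6), ('U', 1)]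

def alienNumbersAgain_alt (s : String) : Int :=
  let counts := PySem.Dict.counter s.toList
  alienWeights.foldl (fun acc p => acc + counts.getD p.1 0 * p.2) 0

-- ===== PRECONDITION & SPEC =====
def Spec_alienNumbersAgain (s : String) (out : Int) : Prop := out = alienNumbersAgain_alt s
instance (s : String) (out : Int) : Decidable (Spec_alienNumbersAgain s out) := by unfold Spec_alienNumbersAgain; infer_instance

-- ===== CLAIM (what is proved, stated in full; the proofs are below) =====
def Claim_equal_alienNumbersAgain : Prop := ∀ (s : String), Dom_alienNumbersAgain s → Spec_alienNumbersAgain s (alienNumbersAgain s)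

-- ===== LEMMAS AND PROOFS =====

-- A's loop equals the weighted sum of the six character counts.
theorem alien_fold_count (l : List Char) (acc : Int) :
    l.foldl
      (fun accumulator char =>
        if char = 'T' then accumulator + 1024
        else if char = 'y' then accumulator + 598
        else if char = '!' then accumulator + 121
        else if char = 'a' then accumulator + 42
        else if char = 'N' then accumulator + 6
        else if char = 'U' then accumulator + 1
        else accumulator)
      acc
    = acc + 1024 * l.count 'T' + 598 * l.count 'y' + 121 * l.count '!'
        + 42 * l.count 'a' + 6 * l.count 'N' + l.count 'U' := by
  induction l generalizing acc with
  | nil => simp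
  | cons c t ih =>
    rw [List.foldl_cons, ih]
    clear ih
    simp only [List.count_cons]
    by_cases h1 : c = 'T'
    · subst h1; simp; ring
    by_cases h2 : c = 'y'
    · subst h2; simp; ring
    by_cases h3 : c = '!'
    · subst h3; simp; ring
    by_cases h4 : c = 'a'
    · subst h4; simp; ring
    by_cases h5 : c = 'N'
    · subst h5; simp; ring
    by_cases h6 : c = 'U'
    · subst h6; simp; ring
    simp [h1, h2, h3, h4, h5, h6]

theorem alienNumbersAgain_spec : Claim_equal_alienNumbersAgain := by
  intro s _
  unfold Spec_alienNumbersAgain alienNumbersAgain alienNumbersAgain_alt alienWeights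
  simp only [List.foldl_cons, List.foldl_nil, PySem.Dict.getD_counter]
  rw [alien_fold_count]
  ring

-- ===== VERDICT (by name: the statement is the Claim_ definition above) =====
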